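-- pv_equiv track=rewrite | github.com/onesixx/sinbakai | rose/utils.py | generate_round
-- ===== SOURCE A (Python) =====
-- def generate_round(bmsStat):
--     round_list = []
--     count = 1
--     for i in range(len(bmsStat)):
--         round_list.append(count)
--         if bmsStat[i] == 7 and  (i == len(bmsStat)-1 or bmsStat[i+1] != 7):
--             count += 1
--     return round_list
-- ===== SOURCE B (Python) =====
-- def generate_round(bmsStat):
--     round_list = []
--     count = 1
--     rest = bmsStat
--     while rest:
--         v = rest[0]
--         k = 1
--         while k < len(rest) and rest[k] == v:
--             k += 1
--         round_list += [count] * k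
--         if v == 7:
--             count += 1
--         rest = rest[k:]
--     return round_list
-- ===== Notes on version B (the rewrite author's own statement) =====
-- stated objective: alternative
-- what changed: B walks maximal runs of consecutive equal values (groupby-style), emitting the round number once per run via list repetition and incrementing only after a run of 7s, instead of A's per-index scan with a lookahead to bmsStat[i+1].
import Mathlib
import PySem

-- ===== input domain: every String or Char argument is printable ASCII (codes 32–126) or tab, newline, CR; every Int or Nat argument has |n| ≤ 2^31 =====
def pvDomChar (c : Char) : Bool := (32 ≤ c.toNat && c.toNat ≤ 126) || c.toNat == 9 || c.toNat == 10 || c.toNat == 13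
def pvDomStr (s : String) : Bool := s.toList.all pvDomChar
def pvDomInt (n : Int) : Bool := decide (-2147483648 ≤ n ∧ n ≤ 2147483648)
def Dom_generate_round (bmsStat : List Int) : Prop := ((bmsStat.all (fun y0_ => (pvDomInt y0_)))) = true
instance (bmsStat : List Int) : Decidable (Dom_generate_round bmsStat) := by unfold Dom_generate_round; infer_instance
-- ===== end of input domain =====

-- B replaces A's per-index scan with lookahead by a run-by-run (groupby-style) walk; alternative decomposition, same O(n) cost.

-- ===== PORT A =====
-- A's 'for i in range(len(bmsStat))' loop as index recursion on i; bmsStat[i] and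
-- bmsStat[i+1] via PySem.List.pyGetD (exact: both indices are in range wherever read).
def generateRoundLoopA (bms : List Int) (rl : List Int) (count : Int) (i : Nat) : List Int :=
  if _h : i < bms.length then
    generateRoundLoopA bms (rl ++ [count])
      (if PySem.List.pyGetD bms (i : Int) 0 = 7 ∧
          (i = bms.length - 1 ∨ PySem.List.pyGetD bms ((i : Int) + 1) 0 ≠ 7)
       then count + 1 else count)
      (i + 1)
  else rl
termination_by bms.length - i

def generate_round (bmsStat : List Int) : List Int :=
  generateRoundLoopA bmsStat [] 1 0

-- ===== PORT B =====
-- B's inner 'while' finds the run of rest[0]; here takeWhile/dropWhile split off the same run.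
def generateRoundRunsB (count : Int) : List Int → List Int
  | [] => []
  | v :: rest =>
    let run := rest.takeWhile (fun x => x == v)
    let rest' := rest.dropWhile (fun x => x == v)
    List.replicate (run.length + 1) count ++
      generateRoundRunsB (if v = 7 then count + 1 else count) rest'
termination_by l => l.length
decreasing_by
  have := List.length_dropWhile_le (p := fun x => x == v) (l := rest)
  simp only [List.length_cons]
  omega

def generate_round_alt (bmsStat : List Int) : List Int :=
  generateRoundRunsB 1 bmsStat

-- ===== PRECONDITION & SPEC =====
def Spec_generate_round (bmsStat : List Int) (out : List Int) : Prop := out = generate_round_alt bmsStat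
instance (bmsStat : List Int) (out : List Int) : Decidable (Spec_generate_round bmsStat out) := by unfold Spec_generate_round; infer_instance

-- ===== CLAIM (what is proved, stated in full; the proofs are below) =====
def Claim_equal_generate_round : Prop := ∀ (bmsStat : List Int), Dom_generate_round bmsStat → Spec_generate_round bmsStat (generate_round bmsStat)

-- ===== LEMMAS AND PROOFS =====

-- Per-element characterisation of A's loop on the remaining suffix.
def aGo (count : Int) : List Int → List Int
  | [] => []
  | v :: rest =>
    count :: aGo (if v = 7 ∧ rest.head? ≠ some 7 then count + 1 else count) rest

lemma aGo_nil (c : Int) : aGo c [] = [] := by simp [aGo]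

lemma aGo_cons (c v : Int) (rest : List Int) :
    aGo c (v :: rest) = c :: aGo (if v = 7 ∧ rest.head? ≠ some 7 then c + 1 else c) rest := by
  simp [aGo]

lemma runsB_nil (c : Int) : generateRoundRunsB c [] = [] := by
  simp [generateRoundRunsB]

lemma runsB_cons (c v : Int) (rest : List Int) :
    generateRoundRunsB c (v :: rest) =
      List.replicate ((rest.takeWhile (fun x => x == v)).length + 1) c ++
        generateRoundRunsB (if v = 7 then c + 1 else c) (rest.dropWhile (fun x => x == v)) := by
  simp [generateRoundRunsB]

lemma loopA_eq_aGo (bms : List Int) :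
    ∀ d i rl count, bms.length - i = d →
      generateRoundLoopA bms rl count i = rl ++ aGo count (bms.drop i) := by
  intro d
  induction d with
  | zero =>
    intro i rl count h
    rw [generateRoundLoopA]
    have hi : ¬ i < bms.length := by omega
    rw [List.drop_eq_nil_of_le (by omega)]
    simp [hi, aGo_nil]
  | succ d ih =>
    intro i rl count h
    have hi : i < bms.length := by omega
    rw [generateRoundLoopA]
    simp only [hi, dif_pos]
    rw [ih (i + 1) _ _ (by omega)]
    rw [List.drop_eq_getElem_cons hi, aGo_cons]
    simp only [List.append_assoc, List.singleton_append]
    congr 2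
    · -- the two step conditions agree
      have hget : PySem.List.pyGetD bms (i : Int) 0 = bms[i] :=
        PySem.List.pyGetD_ofNat (xs := bms) i 0 hi
      by_cases hlast : i = bms.length - 1
      · subst hlast
        have hnone : bms[bms.length - 1 + 1]? = (none : Option Int) :=
          List.getElem?_eq_none (by omega)
        simp [hget, hnone]
      · have hi1 : i + 1 < bms.length := by omega
        have hget1 : PySem.List.pyGetD bms ((i : Int) + 1) 0 = bms[i + 1] := by
          have := PySem.List.pyGetD_ofNat (xs := bms) (i + 1) 0 hi1
          simpa using this
        have hhead : (bms.drop (i + 1)).head? = some bms[i + 1] := by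
          rw [List.drop_eq_getElem_cons hi1]; rfl
        simp [hget, hget1, hhead, hlast]

lemma aGo_eq_runsB : ∀ n (l : List Int), l.length ≤ n → ∀ count,
    aGo count l = generateRoundRunsB count l := by
  intro n
  induction n with
  | zero =>
    intro l hl count
    have : l = [] := List.eq_nil_of_length_eq_zero (by omega)
    subst this; rw [aGo_nil, runsB_nil]
  | succ n ih =>
    intro l hl count
    match l with
    | [] => rw [aGo_nil, runsB_nil]
    | [v] =>
      rw [aGo_cons, aGo_nil, runsB_cons]
      simp [runsB_nil]
    | v :: w :: rs =>
      by_cases hw : w = v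
      · subst hw
        have h1 : generateRoundRunsB count (w :: w :: rs) =
            count :: generateRoundRunsB count (w :: rs) := by
          rw [runsB_cons, runsB_cons]
          simp [List.replicate_succ]
        have h2 : aGo count (w :: w :: rs) = count :: aGo count (w :: rs) := by
          have hc : ¬ (w = 7 ∧ ((w :: rs).head? ≠ some 7)) := by
            by_cases h7 : w = (7 : Int) <;> simp [h7]
          rw [aGo_cons, if_neg hc]
        rw [h1, h2, ih (w :: rs) (by simpa using Nat.le_of_succ_le_succ hl) count]
      · have h1 : generateRoundRunsB count (v :: w :: rs) =
            count :: generateRoundRunsB (if v = 7 then count + 1 else count) (w :: rs) := by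
          rw [runsB_cons]
          simp [hw, List.replicate]
        have hcond : (if v = 7 ∧ ((w :: rs).head? ≠ some 7) then count + 1 else count)
            = (if v = 7 then count + 1 else count) := by
          by_cases h7 : v = (7 : Int)
          · have hw7 : w ≠ (7 : Int) := by rw [h7] at hw; exact hw
            simp [h7, hw7]
          · simp [h7]
        rw [h1, aGo_cons, hcond,
          ih (w :: rs) (by simpa using Nat.le_of_succ_le_succ hl) _]

-- ===== VERDICT (by name: the statement is the Claim_ definition above) =====
theorem generate_round_spec : Claim_equal_generate_round := by
  intro bms _
  unfold Spec_generate_round generate_round generate_round_alt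
  rw [loopA_eq_aGo bms (bms.length - 0) 0 [] 1 rfl]
  simp only [List.drop_zero, List.nil_append]
  exact aGo_eq_runsB bms.length bms le_rfl 1
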